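-- pv_equiv track=rewrite | github.com/drag0nD/generals-replay-parser | parse.py | extract_seed_from_options
-- ===== SOURCE A (Python) =====
-- def extract_seed_from_options(game_options):
--     for pair in game_options.split(";"):
--         pair = pair.strip()
--         if pair.startswith("SD="):
--             try:
--                 seed_str = pair[3:]
--                 return int(seed_str)
--             except ValueError:
--                 return None
--     return None
-- ===== SOURCE B (Python) =====
-- def extract_seed_from_options(game_options):
--     cur = []
--     for ch in game_options + ";":
--         if ch == ";":
--             seg = "".join(cur).strip()
--             if seg.startswith("SD="):
--                 try:
--                     return int(seg[3:])
--                 except ValueError: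
--                     return None
--             cur = []
--         else:
--             cur.append(ch)
--     return None
-- ===== Notes on version B (the rewrite author's own statement) =====
-- stated objective: alternative
-- what changed: Replaced split-into-a-list-then-loop with a single streaming character pass that keeps only the current segment in an accumulator, testing and answering at each semicolon (and at end of string) without ever materialising the list of segments.
import Mathlib
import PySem

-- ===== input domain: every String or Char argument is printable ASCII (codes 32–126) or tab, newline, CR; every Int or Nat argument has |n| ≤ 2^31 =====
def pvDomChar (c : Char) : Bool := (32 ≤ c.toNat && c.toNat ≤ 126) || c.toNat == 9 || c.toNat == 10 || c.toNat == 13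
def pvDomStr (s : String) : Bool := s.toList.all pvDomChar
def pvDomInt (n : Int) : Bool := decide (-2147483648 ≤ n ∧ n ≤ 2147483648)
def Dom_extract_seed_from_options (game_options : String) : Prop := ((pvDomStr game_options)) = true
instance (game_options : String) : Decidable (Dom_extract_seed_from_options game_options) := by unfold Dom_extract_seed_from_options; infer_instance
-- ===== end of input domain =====

-- B replaces split-into-a-list-then-loop with one streaming character pass keeping only the
-- current segment (alternative decomposition, same asymptotic cost). Return value only; no mutation.

-- ===== PORT A =====
-- for pair in game_options.split(";"): pair = pair.strip(); if pair.startswith("SD="):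
--   return int(pair[3:]) (ValueError -> None); else continue; after the loop: None.
-- int(...) is PySem.Int.ofChars? (some = the int, none = ValueError, i.e. Python None).
def pvLoopA : List (List Char) → Option Int
  | [] => none
  | p :: ps =>
    let pair := PySem.Chars.strip p
    if PySem.Chars.startswith pair ['S', 'D', '='] then
      PySem.Int.ofChars? (PySem.List.slice pair (some 3) none)
    else
      pvLoopA ps

def extract_seed_from_options (game_options : String) : Option Int :=
  pvLoopA (PySem.Chars.splitOn game_options.toList [';'])

-- ===== PORT B =====
-- cur accumulates the current segment; at each ';' (and once more at the end, from the
-- appended ";") the segment is stripped, tested for the "SD=" prefix, and answered.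
def pvCheckB (cur : List Char) : Option (Option Int) :=
  let seg := PySem.Chars.strip cur
  if PySem.Chars.startswith seg ['S', 'D', '='] then
    some (PySem.Int.ofChars? (PySem.List.slice seg (some 3) none))
  else
    none

def pvLoopB : List Char → List Char → Option Int
  | [], cur =>
    match pvCheckB cur with
    | some r => r
    | none => none
  | c :: rest, cur =>
    if c = ';' then
      match pvCheckB cur with
      | some r => r
      | none => pvLoopB rest []
    else
      pvLoopB rest (cur ++ [c])

def extract_seed_from_options_alt (game_options : String) : Option Int :=
  pvLoopB game_options.toList []

-- ===== PRECONDITION & SPEC =====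
def Spec_extract_seed_from_options (game_options : String) (out : Option Int) : Prop := out = extract_seed_from_options_alt game_options
instance (game_options : String) (out : Option Int) : Decidable (Spec_extract_seed_from_options game_options out) := by unfold Spec_extract_seed_from_options; infer_instance

-- ===== CLAIM (what is proved, stated in full; the proofs are below) =====
def Claim_equal_extract_seed_from_options : Prop := ∀ (game_options : String), Dom_extract_seed_from_options game_options → Spec_extract_seed_from_options game_options (extract_seed_from_options game_options)

-- ===== LEMMAS AND PROOFS =====

-- The list of segments B walks through, written as a function of the raw characters.
def pvSegs : List Char → List Char → List (List Char)
  | [], cur => [cur]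
  | c :: rest, cur => if c = ';' then cur :: pvSegs rest [] else pvSegs rest (cur ++ [c])

theorem pvGo_eq_segs (l : List Char) : ∀ (fuel : Nat) (cur : List Char) (acc : List (List Char)),
    l.length < fuel →
    PySem.Chars.splitOn.go [';'] fuel l cur.reverse acc = acc.reverse ++ pvSegs l cur := by
  induction l with
  | nil =>
    intro fuel cur acc h
    match fuel with
    | fuel + 1 =>
      simp [PySem.Chars.splitOn.go, pvSegs]
  | cons c rest ih =>
    intro fuel cur acc h
    match fuel with
    | fuel + 1 =>
      rw [PySem.Chars.splitOn.go]
      by_cases hc : c = ';'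
      · subst hc
        simp only [List.isPrefixOf, BEq.rfl, Bool.true_and, if_true]
        have := ih fuel [] (cur :: acc) (by simpa using h)
        simp only [List.reverse_nil] at this
        simp [pvSegs, this]
      · have hpre : [';'].isPrefixOf (c :: rest) = false := by
          simp [List.isPrefixOf]; intro h'; exact hc h'.symm
        simp only [hpre, Bool.false_eq_true, if_false]
        have := ih fuel (cur ++ [c]) acc (by simpa using h)
        simp only [List.reverse_append, List.reverse_singleton, List.singleton_append] at this
        simp [pvSegs, hc, this]

theorem pvSplitOn_eq_segs (s : List Char) : PySem.Chars.splitOn s [';'] = pvSegs s [] := by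
  have := pvGo_eq_segs s (s.length + 1) [] [] (by omega)
  simpa [PySem.Chars.splitOn] using this

theorem pvLoopA_segs (l : List Char) : ∀ cur, pvLoopA (pvSegs l cur) = pvLoopB l cur := by
  induction l with
  | nil =>
    intro cur
    simp only [pvSegs, pvLoopA, pvLoopB, pvCheckB]
    split_ifs <;> simp
  | cons c rest ih =>
    intro cur
    by_cases hc : c = ';'
    · subst hc
      simp only [pvSegs, if_true, pvLoopA, pvLoopB, pvCheckB]
      split_ifs <;> simp [ih]
    · simp [pvSegs, pvLoopB, hc, ih]

-- ===== VERDICT (by name: the statement is the Claim_ definition above) =====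
theorem extract_seed_from_options_spec : Claim_equal_extract_seed_from_options := by
  intro s _
  unfold Spec_extract_seed_from_options extract_seed_from_options extract_seed_from_options_alt
  rw [pvSplitOn_eq_segs, pvLoopA_segs]
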